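-- pv_equiv track=rewrite | github.com/29barra29/PowerDNS-PDNS-MANAGER | backend/app/services/acme.py | find_matching_zone
-- ===== SOURCE A (Python) =====
-- from typing import Iterable, List, Optional, Tuple
--
-- def normalize_zone(zone: str) -> str:
--     """Lowercase + Trailing-Dot. PowerDNS speichert Zonen so, der ACL-Vergleich
--     muss exakt diese Form verwenden."""
--     z = (zone or "").strip().lower()
--     if not z:
--         return z
--     if not z.endswith("."):
--         z += "."
--     return z
--
-- def normalize_fqdn(fqdn: str) -> str:
--     """Lowercase + Trailing-Dot. ``.example.com`` -> ``example.com.``."""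
--     return normalize_zone(fqdn)
--
-- def find_matching_zone(fqdn: str, allowed_zones: Iterable[str]) -> Optional[str]:
--     """Sucht die laengste passende Zone aus ``allowed_zones`` zu ``fqdn``.
--
--     Wenn ``fqdn = smtp.gtgmail.de.`` und ``allowed_zones = ["gtgmail.de.",
--     "smtp.gtgmail.de."]`` wird ``smtp.gtgmail.de.`` zurueckgegeben (longest match).
--
--     Gibt ``None`` zurueck wenn keine Zone matcht.
--     """
--     target = normalize_fqdn(fqdn)
--     if not target:
--         return None
--     candidates = [normalize_zone(z) for z in (allowed_zones or []) if z]
--     candidates = [z for z in candidates if z and (target == z or target.endswith("." + z))]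
--     if not candidates:
--         return None
--     candidates.sort(key=len, reverse=True)
--     return candidates[0]
-- ===== SOURCE B (Python) =====
-- def normalize_zone(zone: str) -> str:
--     z = (zone or "").strip().lower()
--     if not z:
--         return z
--     if not z.endswith("."):
--         z += "."
--     return z
--
-- def normalize_fqdn(fqdn: str) -> str:
--     return normalize_zone(fqdn)
--
-- def find_matching_zone(fqdn, allowed_zones):
--     """Single linear scan keeping the longest match so far (no list building, no sort)."""
--     target = normalize_fqdn(fqdn)
--     if not target:
--         return None
--     best = None
--     for z in (allowed_zones or []):
--         if not z:
--             continue
--         nz = normalize_zone(z)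
--         if nz and (target == nz or target.endswith("." + nz)):
--             if best is None or len(nz) > len(best):
--                 best = nz
--     return best
-- ===== Notes on version B (the rewrite author's own statement) =====
-- stated objective: simpler
-- what changed: Replaced building two candidate lists and a stable reverse sort-by-length with a single linear scan that keeps the longest match seen so far (strict > preserves A's first-of-equal-length tie-break).
import Mathlib
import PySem

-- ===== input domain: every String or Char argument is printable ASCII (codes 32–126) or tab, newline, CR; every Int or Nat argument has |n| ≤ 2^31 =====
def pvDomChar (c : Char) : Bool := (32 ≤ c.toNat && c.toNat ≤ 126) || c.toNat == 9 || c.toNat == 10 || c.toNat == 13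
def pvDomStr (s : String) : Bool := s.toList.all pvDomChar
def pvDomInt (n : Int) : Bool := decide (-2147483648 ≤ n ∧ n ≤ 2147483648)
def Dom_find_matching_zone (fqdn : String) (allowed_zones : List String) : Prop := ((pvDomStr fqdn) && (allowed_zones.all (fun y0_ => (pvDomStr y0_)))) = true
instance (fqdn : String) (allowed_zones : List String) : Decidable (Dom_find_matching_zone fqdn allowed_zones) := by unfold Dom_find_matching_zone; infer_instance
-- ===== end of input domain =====

-- B replaces build-list + stable reverse sort by a single linear scan keeping the longest match so far (objective: simpler).

-- ===== PORT A =====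
-- normalize_zone / normalize_fqdn, on the List Char side (PySem.Chars is the exact model of Python str ops)
def pvNormalize (zone : List Char) : List Char :=
  let z := PySem.Chars.lower (PySem.Chars.strip zone)
  if z = [] then z
  else if PySem.Chars.endswith z ['.'] then z
  else z ++ ['.']

-- the match test of A's second comprehension: z and (target == z or target.endswith("." + z))
def pvMatches (target : List Char) (z : List Char) : Bool :=
  (z != []) && (target == z || PySem.Chars.endswith target ('.' :: z))

def find_matching_zone (fqdn : String) (allowed_zones : List String) : Option String :=
  let target := pvNormalize fqdn.toList
  if target = [] then none
  else
    let candidates := (allowed_zones.filter (fun z => z.toList != [])).map (fun z => pvNormalize z.toList)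
    let candidates := candidates.filter (pvMatches target)
    if candidates = [] then none
    else ((PySem.List.sorted candidates (fun z => z.length) true).head?).map String.ofList

-- ===== PORT B =====
-- 'best = None or len(nz) > len(best)' update of Source B's loop
def pvBest (best : Option (List Char)) (c : List Char) : Option (List Char) :=
  match best with
  | none => some c
  | some b => if b.length < c.length then some c else some b

def find_matching_zone_alt (fqdn : String) (allowed_zones : List String) : Option String :=
  let target := pvNormalize fqdn.toList
  if target = [] then none
  else
    (allowed_zones.foldl (fun best z =>
      if z.toList != [] then
        (if pvMatches target (pvNormalize z.toList) then pvBest best (pvNormalize z.toList) else best)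
      else best) none).map String.ofList

-- ===== PRECONDITION & SPEC =====
def Spec_find_matching_zone (fqdn : String) (allowed_zones : List String) (out : Option String) : Prop := out = find_matching_zone_alt fqdn allowed_zones
instance (fqdn : String) (allowed_zones : List String) (out : Option String) : Decidable (Spec_find_matching_zone fqdn allowed_zones out) := by unfold Spec_find_matching_zone; infer_instance

-- ===== CLAIM (what is proved, stated in full; the proofs are below) =====
def Claim_equal_find_matching_zone : Prop := ∀ (fqdn : String) (allowed_zones : List String), Dom_find_matching_zone fqdn allowed_zones → Spec_find_matching_zone fqdn allowed_zones (find_matching_zone fqdn allowed_zones)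

-- ===== LEMMAS AND PROOFS =====

-- inserting x (before the first strictly shorter element) changes the head iff the old head is strictly shorter: exactly pvBest
lemma head_insertBy (x : List Char) (acc : List (List Char)) :
    (PySem.List.insertBy (fun a b => decide (b.length < a.length)) x acc).head? = pvBest acc.head? x := by
  cases acc with
  | nil => simp [PySem.List.insertBy, pvBest]
  | cons y ys =>
    simp only [PySem.List.insertBy, pvBest, List.head?]
    by_cases h : y.length < x.length <;> simp [h]

lemma head_foldl_insertBy (l : List (List Char)) (acc : List (List Char)) :
    (l.foldl (fun a x => PySem.List.insertBy (fun a b => decide ((fun z : List Char => z.length) b < (fun z : List Char => z.length) a)) x a) acc).head?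
      = l.foldl pvBest acc.head? := by
  induction l generalizing acc with
  | nil => rfl
  | cons x t ih => simp only [List.foldl_cons, ih, head_insertBy]

-- head of the stable descending-by-length sort = running 'first longest' fold
lemma head_sorted_eq_foldl (l : List (List Char)) :
    (PySem.List.sorted l (fun z => z.length) true).head? = l.foldl pvBest none := by
  rw [PySem.List.sorted_rev_eq_foldl_insertBy]
  simpa using head_foldl_insertBy l []

-- ===== VERDICT (by name: the statement is the Claim_ definition above) =====
theorem find_matching_zone_spec : Claim_equal_find_matching_zone := by
  intro fqdn allowed_zones _
  unfold Spec_find_matching_zone find_matching_zone find_matching_zone_alt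
  by_cases ht : pvNormalize fqdn.toList = []
  · simp [ht]
  · simp only [ht, if_false]
    rw [PySem.List.foldl_if_eq_foldl_filter (p := fun z : String => z.toList != [])
        (f := fun best z => if pvMatches (pvNormalize fqdn.toList) (pvNormalize z.toList) then pvBest best (pvNormalize z.toList) else best)]
    rw [show (List.filter (fun z : String => z.toList != []) allowed_zones).foldl
          (fun best z => if pvMatches (pvNormalize fqdn.toList) (pvNormalize z.toList) then pvBest best (pvNormalize z.toList) else best) none
        = ((List.filter (fun z : String => z.toList != []) allowed_zones).map (fun z => pvNormalize z.toList)).foldl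
          (fun best c => if pvMatches (pvNormalize fqdn.toList) c then pvBest best c else best) none
      from (List.foldl_map (f := fun z : String => pvNormalize z.toList)
        (g := fun best c => if pvMatches (pvNormalize fqdn.toList) c then pvBest best c else best)
        (init := none)).symm]
    rw [PySem.List.foldl_if_eq_foldl_filter (p := pvMatches (pvNormalize fqdn.toList)) (f := pvBest)]
    rw [← head_sorted_eq_foldl]
    by_cases hc : ((allowed_zones.filter (fun z => z.toList != [])).map (fun z => pvNormalize z.toList)).filter (pvMatches (pvNormalize fqdn.toList)) = []
    · simp [hc, PySem.List.sorted_eq_nil_iff]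
    · simp [hc]
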